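-- pv_equiv track=rewrite | github.com/Ashiq-am/Data-Structures-Algorithm | 1.Python Algorithms/8.Bitwise Algorithms/1.Basic/97.Set all odd bits of a number/Example 1.py | oddbitsetnumber
-- ===== SOURCE A (Python) =====
-- def oddbitsetnumber(n):
--     count = 0
--     # res for store 010101.. number
--     res = 0
--
--     # generate number form of 010101.....till
--     # temp size
--     temp = n
--     while temp > 0:
--
--         # if bit is odd, then generate
--         # number and or with res
--         if count % 2 == 0:
--             res |= (1 << count)
--
--         count += 1
--         temp >>= 1
--
--     return (n | res)
-- ===== SOURCE B (Python) =====
-- def oddbitsetnumber(n):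
--     # closed-form even-position mask instead of a bit-by-bit loop
--     if n <= 0:
--         return n
--     m = (n.bit_length() + 1) // 2
--     return n | (((1 << (2 * m)) - 1) // 3)
-- ===== Notes on version B (the rewrite author's own statement) =====
-- stated objective: alternative
-- what changed: Replaces A's per-bit while-loop (shift, test parity, OR each even bit) with a closed-form mask: B computes m = ceil(bit_length/2) and ORs n with ((1 << 2m) - 1) // 3, the 0101...01 pattern of n's width, returning n unchanged for n <= 0 where there are no positive bits to scan.
import Mathlib
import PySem

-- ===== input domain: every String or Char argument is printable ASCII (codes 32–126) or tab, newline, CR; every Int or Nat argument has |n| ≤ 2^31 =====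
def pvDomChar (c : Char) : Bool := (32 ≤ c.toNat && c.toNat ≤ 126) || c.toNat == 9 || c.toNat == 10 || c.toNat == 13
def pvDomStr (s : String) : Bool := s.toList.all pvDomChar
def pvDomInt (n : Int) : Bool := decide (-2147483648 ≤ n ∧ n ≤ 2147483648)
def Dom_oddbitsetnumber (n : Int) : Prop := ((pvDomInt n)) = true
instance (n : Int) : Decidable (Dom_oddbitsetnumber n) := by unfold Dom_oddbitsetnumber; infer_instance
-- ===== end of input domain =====

-- B replaces A's bit-by-bit while-loop with a closed-form even-bit mask ((4^m - 1)/3) of n's bit length; return values only, no side effects.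

-- ===== PORT A =====
-- termination helper for the while-loop: temp >>= 1 strictly shrinks a positive temp
theorem pvShiftRightToNatLt (a : Int) (h : 0 < a) : (a >>> (1 : Nat)).toNat < a.toNat := by
  obtain ⟨t, rfl⟩ : ∃ t : Nat, a = (t : Int) := ⟨a.toNat, (Int.toNat_of_nonneg h.le).symm⟩
  rw [← Int.shiftRight_natCast_right, Int.shiftRight_natCast]
  simp only [Int.toNat_natCast, Nat.shiftRight_succ, Nat.shiftRight_zero]
  omega

-- while temp > 0: (count is the loop counter, always ≥ 0, hence Nat)
def oddbitsetnumberLoop (temp : Int) (count : Nat) (res : Int) : Int :=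
  if h : 0 < temp then
    oddbitsetnumberLoop (temp >>> (1 : Nat)) (count + 1)
      (if count % 2 = 0 then PySem.Int.bor res ((1 : Int) <<< count) else res)
  else res
termination_by temp.toNat
decreasing_by exact pvShiftRightToNatLt temp h

def oddbitsetnumber (n : Int) : Int :=
  PySem.Int.bor n (oddbitsetnumberLoop n 0 0)

-- ===== PORT B =====
def oddbitsetnumber_alt (n : Int) : Int :=
  if n ≤ 0 then n
  else
    let m : Nat := (PySem.Int.bitLength n + 1) / 2
    PySem.Int.bor n (PySem.Int.floordiv ((1 : Int) <<< (2 * m) - 1) 3)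

-- ===== PRECONDITION & SPEC =====
def Spec_oddbitsetnumber (n : Int) (out : Int) : Prop := out = oddbitsetnumber_alt n
instance (n : Int) (out : Int) : Decidable (Spec_oddbitsetnumber n out) := by unfold Spec_oddbitsetnumber; infer_instance

-- ===== CLAIM (what is proved, stated in full; the proofs are below) =====
def Claim_equal_oddbitsetnumber : Prop := ∀ (n : Int), Dom_oddbitsetnumber n → Spec_oddbitsetnumber n (oddbitsetnumber n)

-- ===== LEMMAS AND PROOFS =====

-- or-ing in a fresh higher bit is addition
theorem pvLorTwoPow (c : Nat) : ∀ r : Nat, r < 2 ^ c → r ||| 2 ^ c = r + 2 ^ c := by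
  induction c with
  | zero => intro r hr; interval_cases r; decide
  | succ c ih =>
    intro r hr
    have hb := Nat.bodd_add_div2 r
    have hp : 2 ^ (c + 1) = 2 * 2 ^ c := by rw [pow_succ]; ring
    cases hB : r.bodd with
    | false =>
      rw [hB] at hb; simp only [Bool.toNat_false, Nat.zero_add] at hb
      have h1 : r = Nat.bit false r.div2 := by simp [Nat.bit]; omega
      have h2 : 2 ^ (c + 1) = Nat.bit false (2 ^ c) := by simp [Nat.bit]; omega
      rw [h1, h2, Nat.lor_bit, ih r.div2 (by omega)]
      simp [Nat.bit]; omega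
    | true =>
      rw [hB] at hb; simp only [Bool.toNat_true] at hb
      have h1 : r = Nat.bit true r.div2 := by simp [Nat.bit]; omega
      have h2 : 2 ^ (c + 1) = Nat.bit false (2 ^ c) := by simp [Nat.bit]; omega
      rw [h1, h2, Nat.lor_bit, ih r.div2 (by omega)]
      simp [Nat.bit]; omega

-- the sum the loop accumulates, over the remaining bits of temp, starting at position count
def pvEm (c : Nat) (t : Nat) : Nat :=
  if 0 < t then (if c % 2 = 0 then 2 ^ c else 0) + pvEm (c + 1) (t / 2) else 0
termination_by t
decreasing_by omega

-- closed-form core: u t with 3 * u t + 1 = 4 ^ ⌈bitlen t / 2⌉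
def pvU (t : Nat) : Nat :=
  if 0 < t then 1 + 4 * pvU (t / 4) else 0
termination_by t
decreasing_by omega

theorem pvLoop_eq_em : ∀ (t : Nat), ∀ (c : Nat) (r : Nat), r < 2 ^ c →
    oddbitsetnumberLoop (t : Int) c (r : Int) = ((r + pvEm c t : Nat) : Int) := by
  intro t
  induction t using Nat.strong_induction_on with
  | _ t ih =>
    intro c r hr
    rw [oddbitsetnumberLoop, pvEm]
    by_cases ht : 0 < t
    · have hcast : ((t : Int) >>> (1 : Nat)) = ((t / 2 : Nat) : Int) := by
        rw [← Int.shiftRight_natCast_right, Int.shiftRight_natCast]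
        simp [Nat.shiftRight_succ]
      have hpos : (0 : Int) < (t : Int) := by exact_mod_cast ht
      rw [dif_pos hpos, hcast]
      have hshift : ((1 : Int) <<< c) = ((2 ^ c : Nat) : Int) := by
        rw [← Int.shiftLeft_natCast_right, Int.one_shiftLeft]
      by_cases hc : c % 2 = 0
      · rw [if_pos hc, hshift, PySem.Int.bor_natCast,
          pvLorTwoPow c r hr,
          ih (t / 2) (by omega) (c + 1) (r + 2 ^ c) (by rw [pow_succ]; omega)]
        rw [if_pos ht, if_pos hc]
        congr 1
        omega
      · rw [if_neg hc, ih (t / 2) (by omega) (c + 1) r (by rw [pow_succ]; omega)]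
        rw [if_pos ht, if_neg hc]
        congr 1
        omega
    · have : ¬ (0 : Int) < (t : Int) := by exact_mod_cast ht
      rw [dif_neg this, if_neg ht]
      simp

theorem pvEm_eq_u : ∀ (t : Nat), ∀ (c : Nat), c % 2 = 0 → pvEm c t = 2 ^ c * pvU t := by
  intro t
  induction t using Nat.strong_induction_on with
  | _ t ih =>
    intro c hc
    rw [pvEm, pvU]
    by_cases ht : 0 < t
    · rw [if_pos ht, if_pos ht, if_pos hc]
      have hodd : (c + 1) % 2 ≠ 0 := by omega
      rw [pvEm, if_neg hodd]
      by_cases ht2 : 0 < t / 2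
      · rw [if_pos ht2]
        have h4 : t / 2 / 2 = t / 4 := by omega
        rw [h4, ih (t / 4) (by omega) (c + 1 + 1) (by omega)]
        rw [pow_succ, pow_succ]
        ring
      · rw [if_neg ht2]
        have h4 : t / 4 = 0 := by omega
        rw [h4, pvU, if_neg (by omega)]
        ring
    · rw [if_neg ht, if_neg ht]; ring

-- bit length of a Nat as PySem computes it on its cast
theorem pvU_closed : ∀ (t : Nat), 3 * pvU t + 1 = 4 ^ ((PySem.Int.bitLength (t : Int) + 1) / 2) := by
  intro t
  induction t using Nat.strong_induction_on with
  | _ t ih =>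
    rw [pvU]
    by_cases ht : 0 < t
    · rw [if_pos ht]
      by_cases h4 : 4 ≤ t
      · have hbl : PySem.Int.bitLength (t : Int) = PySem.Int.bitLength ((t / 4 : Nat) : Int) + 2 := by
          rw [PySem.Int.bitLength_natCast ht, PySem.Int.bitLength_natCast (m := t / 2) (by omega)]
          have : t / 2 / 2 = t / 4 := by omega
          rw [this]
        have := ih (t / 4) (by omega)
        rw [hbl]
        have harg : (PySem.Int.bitLength ((t / 4 : Nat) : Int) + 2 + 1) / 2
            = (PySem.Int.bitLength ((t / 4 : Nat) : Int) + 1) / 2 + 1 := by omega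
        rw [harg, pow_succ]
        omega
      · -- t ∈ {1, 2, 3}
        interval_cases t <;> simp [pvU] <;> decide
    · rw [if_neg ht]
      have : t = 0 := by omega
      subst this
      decide

-- ===== VERDICT (by name: the statement is the Claim_ definition above) =====
theorem oddbitsetnumber_spec : Claim_equal_oddbitsetnumber := by
  intro n _
  unfold Spec_oddbitsetnumber oddbitsetnumber oddbitsetnumber_alt
  by_cases hn : n ≤ 0
  · rw [if_pos hn, oddbitsetnumberLoop, dif_neg (by omega), PySem.Int.bor_zero]
  · rw [if_neg hn]
    have hpos : 0 < n := by omega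
    obtain ⟨t, rfl⟩ : ∃ t : Nat, n = (t : Int) := ⟨n.toNat, (Int.toNat_of_nonneg hpos.le).symm⟩
    have ht : 0 < t := by exact_mod_cast hpos
    have h1 : oddbitsetnumberLoop (t : Int) 0 0 = ((pvU t : Nat) : Int) := by
      have := pvLoop_eq_em t 0 0 (by norm_num)
      rw [show ((0 : Nat) : Int) = (0 : Int) from rfl] at this
      rw [this, pvEm_eq_u t 0 (by norm_num)]
      norm_num
    rw [h1]
    congr 1
    set m : Nat := (PySem.Int.bitLength (t : Int) + 1) / 2 with hm
    have hshift : ((1 : Int) <<< (2 * m)) = ((2 ^ (2 * m) : Nat) : Int) := by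
      rw [← Int.shiftLeft_natCast_right, Int.one_shiftLeft]
    have hpow : (2 : Nat) ^ (2 * m) = 4 ^ m := by
      rw [pow_mul]; norm_num
    have hu := pvU_closed t
    rw [← hm] at hu
    have h2 : ((2 ^ (2 * m) : Nat) : Int) - 1 = (((2 ^ (2 * m) - 1 : Nat)) : Int) := by
      have : 1 ≤ 2 ^ (2 * m) := Nat.one_le_two_pow
      push_cast [this]
      ring
    rw [hshift, h2, show (3 : Int) = ((3 : Nat) : Int) from rfl, PySem.Int.floordiv_natCast]
    congr 1
    rw [hpow]
    omega
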